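-- pv_equiv track=rewrite | github.com/embydextrous/Interview | dp/gfg/44-templeOfferings.py | templeOfferings
-- ===== SOURCE A (Python) =====
-- def templeOfferings(a):
--     n = len(a)
--     dp = [0] * n
--     dp[0] = 1
--     for i in range(1, n):
--         if a[i] > a[i-1]:
--             dp[i] = 1 + dp[i-1]
--         else:
--             dp[i] = 1
--     for i in range(n - 2, -1, -1):
--         if a[i] > a[i+1]:
--             dp[i] = max(dp[i], dp[i+1] + 1)
--     return sum(dp)
-- ===== SOURCE B (Python) =====
-- def templeOfferings(a):
--     if not a:
--         return 0
--     total, up, down, peak = 1, 0, 0, 0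
--     for prev, x in zip(a, a[1:]):
--         if x > prev:
--             up += 1
--             down = 0
--             peak = up
--             total += 1 + up
--         elif x == prev:
--             up = down = peak = 0
--             total += 1
--         else:
--             up = 0
--             down += 1
--             total += 1 + down - (1 if peak >= down else 0)
--     return total
-- ===== Notes on version B (the rewrite author's own statement) =====
-- stated objective: alternative
-- what changed: Replaced the two dp-array passes (forward rise pass, backward max pass, then sum) by a single left-to-right slope-counting scan that keeps only (total, up, down, peak) in O(1) extra space and adds each element's offering on the fly.
import Mathlib
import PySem

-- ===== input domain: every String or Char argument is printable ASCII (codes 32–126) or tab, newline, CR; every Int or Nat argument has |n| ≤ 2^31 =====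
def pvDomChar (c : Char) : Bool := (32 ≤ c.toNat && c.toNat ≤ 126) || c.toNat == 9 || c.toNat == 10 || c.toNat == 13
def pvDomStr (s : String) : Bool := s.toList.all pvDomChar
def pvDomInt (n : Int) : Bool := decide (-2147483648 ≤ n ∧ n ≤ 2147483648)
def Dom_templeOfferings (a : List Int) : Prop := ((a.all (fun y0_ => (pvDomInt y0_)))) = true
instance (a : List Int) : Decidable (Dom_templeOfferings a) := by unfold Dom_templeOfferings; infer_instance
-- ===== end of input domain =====

-- B replaces A's two dp-array passes by a single left-to-right slope-counting scan with
-- O(1) extra state (total, up, down, peak); equivalence is about the RETURN value.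

-- ===== PORT A =====
-- for i in range(1, n): dp[i] = 1 + dp[i-1] if a[i] > a[i-1] else 1
-- (all indices are in range on every iteration, so List.getD is exact here)
def pvA_loop1 (a : List Int) (dp : List Int) (i : Nat) : List Int :=
  if _h : i < a.length then
    pvA_loop1 a (dp.set i (if a.getD i 0 > a.getD (i-1) 0 then 1 + dp.getD (i-1) 0 else 1)) (i+1)
  else dp
termination_by a.length - i

-- for i in range(n-2, -1, -1): if a[i] > a[i+1]: dp[i] = max(dp[i], dp[i+1]+1)
-- (entered with i = n-2 only when n ≥ 2; i counts down to 0; indices in range, getD exact)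
def pvA_loop2 (a : List Int) (dp : List Int) : Nat → List Int
  | 0 => if a.getD 0 0 > a.getD 1 0 then dp.set 0 (max (dp.getD 0 0) (dp.getD 1 0 + 1)) else dp
  | m+1 =>
      pvA_loop2 a
        (if a.getD (m+1) 0 > a.getD (m+2) 0
         then dp.set (m+1) (max (dp.getD (m+1) 0) (dp.getD (m+2) 0 + 1)) else dp) m

def templeOfferings (a : List Int) : Int :=
  let n := a.length
  let dp0 := (List.replicate n (0:Int)).set 0 1  -- first dp write (IndexError when a is empty: excluded by Pre_)
  let dp1 := pvA_loop1 a dp0 1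
  let dp2 := if 2 ≤ n then pvA_loop2 a dp1 (n-2) else dp1
  dp2.sum

-- ===== PORT B =====
-- one step of the scan over an adjacent pair (prev, x); state = (total, up, down, peak)
def pvB_step (s : Int × Int × Int × Int) (p : Int × Int) : Int × Int × Int × Int :=
  let (total, up, down, peak) := s
  let (prev, x) := p
  if x > prev then
    (total + (1 + (up + 1)), up + 1, 0, up + 1)
  else if x = prev then
    (total + 1, 0, 0, 0)
  else
    (total + (1 + (down + 1) - (if peak ≥ down + 1 then 1 else 0)), 0, down + 1, peak)

def templeOfferings_alt (a : List Int) : Int :=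
  match a with
  | [] => 0
  | _ :: _ => ((a.zip (a.drop 1)).foldl pvB_step (1, 0, 0, 0)).1   -- zip(a, a[1:])

-- ===== PRECONDITION & SPEC =====
-- Pre_ excludes only the empty list, on which Python A raises IndexError at its first dp write.
def Pre_templeOfferings (a : List Int) : Prop := a ≠ []
instance (a : List Int) : Decidable (Pre_templeOfferings a) := by unfold Pre_templeOfferings; infer_instance
def pvWitness_templeOfferings : List Int := [1, 3, 2, 2, 5]

def Spec_templeOfferings (a : List Int) (out : Int) : Prop := out = templeOfferings_alt a
instance (a : List Int) (out : Int) : Decidable (Spec_templeOfferings a out) := by unfold Spec_templeOfferings; infer_instance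

-- ===== CLAIM (what is proved, stated in full; the proofs are below) =====
def Claim_equal_templeOfferings : Prop := ∀ (a : List Int), Dom_templeOfferings a → Pre_templeOfferings a → Spec_templeOfferings a (templeOfferings a)

-- ===== LEMMAS AND PROOFS =====

-- pvL a i = length of the maximal strictly increasing run of a ending at index i
def pvL (a : List Int) : Nat → Int
  | 0 => 1
  | i+1 => if a.getD (i+1) 0 > a.getD i 0 then pvL a i + 1 else 1

-- pvF a k = number of trailing strict falls ending at index k
def pvF (a : List Int) : Nat → Nat
  | 0 => 0
  | i+1 => if a.getD i 0 > a.getD (i+1) 0 then pvF a i + 1 else 0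

-- pvR a k i = length of the strictly decreasing run starting at i, truncated at index k
def pvR (a : List Int) (k i : Nat) : Int :=
  if _h : i < k ∧ a.getD i 0 > a.getD (i+1) 0 then pvR a k (i+1) + 1 else 1
termination_by k - i
decreasing_by omega

-- pvS a k = Σ_{i ≤ k} max (pvL a i) (pvR a k i): the offerings total of the prefix a[0..k]
def pvS (a : List Int) (k : Nat) : Int :=
  ∑ i ∈ Finset.range (k+1), max (pvL a i) (pvR a k i)

lemma pvL_pos (a : List Int) (i : Nat) : 1 ≤ pvL a i := by
  cases i with
  | zero => simp [pvL]
  | succ m =>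
    simp only [pvL]
    split
    · linarith [pvL_pos a m]
    · exact le_refl 1

lemma pvL_eq_one_of_fall (a : List Int) (i : Nat) (h : a.getD i 0 > a.getD (i+1) 0) :
    pvL a (i+1) = 1 := by
  simp only [pvL]
  rw [if_neg (by omega)]

lemma pvR_pos (a : List Int) (k i : Nat) : 1 ≤ pvR a k i := by
  by_cases h : i < k ∧ a.getD i 0 > a.getD (i+1) 0
  · rw [pvR, dif_pos h]
    linarith [pvR_pos a k (i+1)]
  · rw [pvR, dif_neg h]
termination_by k - i
decreasing_by omega

lemma pvR_self (a : List Int) (k : Nat) : pvR a k k = 1 := by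
  rw [pvR, dif_neg (fun hc => absurd hc.1 (lt_irrefl k))]

lemma pvR_one (a : List Int) (k i : Nat) (hf : ¬ a.getD i 0 > a.getD (i+1) 0) :
    pvR a k i = 1 := by
  rw [pvR, dif_neg (by tauto)]

lemma pvF_le (a : List Int) (k : Nat) : pvF a k ≤ k := by
  induction k with
  | zero => simp [pvF]
  | succ m ih =>
    simp only [pvF]
    split <;> omega

lemma pvF_chain (a : List Int) (k : Nat) :
    ∀ j, k - pvF a k ≤ j → j < k → a.getD j 0 > a.getD (j+1) 0 := by
  induction k with
  | zero => intro j h1 h2; omega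
  | succ m ih =>
    intro j h1 h2
    by_cases hf : a.getD m 0 > a.getD (m+1) 0
    · have hpf : pvF a (m+1) = pvF a m + 1 := by simp only [pvF]; rw [if_pos hf]
      rw [hpf] at h1
      rcases Nat.lt_succ_iff_lt_or_eq.mp h2 with h' | h'
      · exact ih j (by omega) h'
      · subst h'; exact hf
    · have hpf : pvF a (m+1) = 0 := by simp only [pvF]; rw [if_neg hf]
      rw [hpf] at h1; omega

lemma pvF_start (a : List Int) (k : Nat) (h : 0 < k - pvF a k) :
    ¬ a.getD (k - pvF a k - 1) 0 > a.getD (k - pvF a k) 0 := by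
  induction k with
  | zero => exfalso; simp [pvF] at h
  | succ m ih =>
    by_cases hf : a.getD m 0 > a.getD (m+1) 0
    · have hpf : pvF a (m+1) = pvF a m + 1 := by simp only [pvF]; rw [if_pos hf]
      rw [hpf] at h ⊢
      have he : m + 1 - (pvF a m + 1) = m - pvF a m := by omega
      rw [he] at h ⊢
      exact ih h
    · have hpf : pvF a (m+1) = 0 := by simp only [pvF]; rw [if_neg hf]
      rw [hpf]
      simpa using hf

lemma pvR_of_chain (a : List Int) (k i : Nat) (hik : i ≤ k)
    (h : ∀ j, i ≤ j → j < k → a.getD j 0 > a.getD (j+1) 0) :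
    pvR a k i = (k : Int) - i + 1 := by
  by_cases hlt : i < k
  · conv_lhs => rw [pvR]
    rw [dif_pos ⟨hlt, h i le_rfl hlt⟩,
        pvR_of_chain a k (i+1) hlt (fun j hj1 hj2 => h j (by omega) hj2)]
    push_cast; ring
  · have he : i = k := by omega
    subst he
    rw [pvR_self]; ring
termination_by k - i
decreasing_by omega

lemma pvR_stable (a : List Int) (k i : Nat) (hk : ¬ a.getD k 0 > a.getD (k+1) 0)
    (hi : i ≤ k) : pvR a (k+1) i = pvR a k i := by
  by_cases hf : a.getD i 0 > a.getD (i+1) 0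
  · by_cases hik : i < k
    · conv_lhs => rw [pvR]
      conv_rhs => rw [pvR]
      rw [dif_pos ⟨by omega, hf⟩, dif_pos ⟨hik, hf⟩,
          pvR_stable a k (i+1) hk (by omega)]
    · have he : i = k := by omega
      subst he
      exact absurd hf hk
  · rw [pvR_one a (k+1) i hf, pvR_one a k i hf]
termination_by k - i
decreasing_by omega

lemma pvR_stable_lt (a : List Int) (k i : Nat) (hi : i < k - pvF a k) :
    pvR a (k+1) i = pvR a k i := by
  have hik : i < k := by have := pvF_le a k; omega
  by_cases hf : a.getD i 0 > a.getD (i+1) 0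
  · have hrec : i + 1 < k - pvF a k := by
      rcases Nat.lt_or_ge (i+1) (k - pvF a k) with h' | h'
      · exact h'
      · exfalso
        have h'' : i + 1 = k - pvF a k := by omega
        have hst := pvF_start a k (by omega)
        apply hst
        rw [show k - pvF a k - 1 = i from by omega, show k - pvF a k = i + 1 from h''.symm]
        exact hf
    conv_lhs => rw [pvR]
    conv_rhs => rw [pvR]
    rw [dif_pos ⟨by omega, hf⟩, dif_pos ⟨hik, hf⟩, pvR_stable_lt a k (i+1) hrec]
  · rw [pvR_one a (k+1) i hf, pvR_one a k i hf]
termination_by k - i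
decreasing_by omega

lemma pvS_succ_rise (a : List Int) (k : Nat) (h : a.getD (k+1) 0 > a.getD k 0) :
    pvS a (k+1) = pvS a k + pvL a (k+1) := by
  have hk' : ¬ a.getD k 0 > a.getD (k+1) 0 := by omega
  unfold pvS
  rw [Finset.sum_range_succ,
      Finset.sum_congr rfl
        (fun i hi => by rw [pvR_stable a k i hk' (by have := Finset.mem_range.mp hi; omega)]),
      pvR_self, max_eq_left (pvL_pos a (k+1))]

lemma pvS_succ_eq (a : List Int) (k : Nat) (h : a.getD (k+1) 0 = a.getD k 0) :
    pvS a (k+1) = pvS a k + 1 := by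
  have hk' : ¬ a.getD k 0 > a.getD (k+1) 0 := by omega
  have hL : pvL a (k+1) = 1 := by simp only [pvL]; rw [if_neg (by omega)]
  unfold pvS
  rw [Finset.sum_range_succ,
      Finset.sum_congr rfl
        (fun i hi => by rw [pvR_stable a k i hk' (by have := Finset.mem_range.mp hi; omega)]),
      pvR_self, hL]
  norm_num

lemma pvS_succ_fall (a : List Int) (k : Nat) (h : a.getD k 0 > a.getD (k+1) 0) :
    pvS a (k+1) = pvS a k + ((pvF a k : Int) + 2
      - (if pvL a (k - pvF a k) - 1 ≥ (pvF a k : Int) + 1 then 1 else 0)) := by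
  have hfle : pvF a k ≤ k := pvF_le a k
  set f := pvF a k with hf
  set p := k - f with hp
  have hchain : ∀ j, p ≤ j → j < k → a.getD j 0 > a.getD (j+1) 0 := pvF_chain a k
  have hchain' : ∀ j, p ≤ j → j < k+1 → a.getD j 0 > a.getD (j+1) 0 := by
    intro j hj1 hj2
    rcases Nat.lt_succ_iff_lt_or_eq.mp hj2 with h' | h'
    · exact hchain j hj1 h'
    · subst h'; exact h
  have hold_run : ∀ i, p ≤ i → i ≤ k → pvR a k i = (k:Int) - i + 1 := fun i hi1 hi2 =>
    pvR_of_chain a k i hi2 (fun j hj1 hj2 => hchain j (le_trans hi1 hj1) hj2)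
  have hnew_run : ∀ i, p ≤ i → i ≤ k+1 → pvR a (k+1) i = (k:Int) + 1 - i + 1 := by
    intro i hi1 hi2
    rw [pvR_of_chain a (k+1) i hi2 (fun j hj1 hj2 => hchain' j (le_trans hi1 hj1) hj2)]
    push_cast; ring
  have hL_run : ∀ i, p < i → i ≤ k → pvL a i = 1 := by
    intro i hi1 hi2
    obtain ⟨m, rfl⟩ : ∃ m, i = m + 1 := ⟨i-1, by omega⟩
    exact pvL_eq_one_of_fall a m (hchain m (by omega) (by omega))
  have hsplit : ∀ g : Nat → Int, ∑ i ∈ Finset.range (k+1), g i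
      = ((∑ i ∈ Finset.Ico 0 p, g i) + g p) + ∑ i ∈ Finset.Ico (p+1) (k+1), g i := by
    intro g
    rw [Finset.range_eq_Ico,
        ← Finset.sum_Ico_consecutive g (Nat.zero_le p) (by omega : p ≤ k+1),
        ← Finset.sum_Ico_consecutive g (by omega : p ≤ p+1) (by omega : p+1 ≤ k+1),
        Nat.Ico_succ_singleton, Finset.sum_singleton, add_assoc]
  unfold pvS
  rw [Finset.sum_range_succ]
  rw [hsplit (fun i => max (pvL a i) (pvR a (k+1) i)),
      hsplit (fun i => max (pvL a i) (pvR a k i))]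
  have e1 : ∑ i ∈ Finset.Ico 0 p, max (pvL a i) (pvR a (k+1) i)
      = ∑ i ∈ Finset.Ico 0 p, max (pvL a i) (pvR a k i) :=
    Finset.sum_congr rfl (fun i hi => by
      rw [pvR_stable_lt a k i (Finset.mem_Ico.mp hi).2])
  have e2 : ∑ i ∈ Finset.Ico (p+1) (k+1), max (pvL a i) (pvR a (k+1) i)
      = (∑ i ∈ Finset.Ico (p+1) (k+1), max (pvL a i) (pvR a k i)) + f := by
    have hterm : ∀ i ∈ Finset.Ico (p+1) (k+1),
        max (pvL a i) (pvR a (k+1) i) = max (pvL a i) (pvR a k i) + 1 := by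
      intro i hi
      obtain ⟨hi1, hi2⟩ := Finset.mem_Ico.mp hi
      have hik : i ≤ k := by omega
      rw [hL_run i (by omega) hik, hold_run i (by omega) hik, hnew_run i (by omega) (by omega)]
      have h1 : (i:Int) ≤ (k:Int) := by exact_mod_cast hik
      simp only [max_def]
      split_ifs <;> omega
    rw [Finset.sum_congr rfl hterm, Finset.sum_add_distrib, Finset.sum_const, Nat.card_Ico,
        show k + 1 - (p+1) = f from by omega]
    simp
  have e3 : max (pvL a p) (pvR a (k+1) p)
      = max (pvL a p) (pvR a k p) + (1 - (if pvL a p - 1 ≥ (f:Int) + 1 then 1 else 0)) := by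
    rw [hold_run p le_rfl (by omega), hnew_run p le_rfl (by omega)]
    have hkp : (k:Int) - p = f := by
      have : p + f = k := by omega
      have := congrArg (fun x : Nat => (x : Int)) this
      push_cast at this
      omega
    rw [show (k:Int) - p + 1 = (f:Int) + 1 from by omega,
        show (k:Int) + 1 - p + 1 = (f:Int) + 2 from by omega]
    simp only [max_def]
    split_ifs <;> omega
  have e4 : max (pvL a (k+1)) (pvR a (k+1) (k+1)) = 1 := by
    rw [pvR_self, pvL_eq_one_of_fall a k h]
    simp
  rw [e1, e2, e3, e4]
  ring

-- ---- B side ----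
lemma pvB_inv (a : List Int) (k : Nat) (hk : k < a.length) :
    ((a.zip (a.drop 1)).take k).foldl pvB_step (1, 0, 0, 0)
      = (pvS a k, pvL a k - 1, (pvF a k : Int), pvL a (k - pvF a k) - 1) := by
  induction k with
  | zero =>
    have h0 : pvS a 0 = 1 := by
      unfold pvS
      rw [Finset.sum_range_one, pvR_self]
      simp [pvL]
    simp [h0, pvL, pvF]
  | succ k ih =>
    have hk' : k < a.length := by omega
    have hzlen : k < (a.zip (a.drop 1)).length := by
      simp only [List.length_zip, List.length_drop]
      omega
    have hzk : (a.zip (a.drop 1))[k]'hzlen = (a.getD k 0, a.getD (k+1) 0) := by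
      simp only [List.getElem_zip, List.getElem_drop]
      rw [List.getD_eq_getElem a 0 (by omega : k < a.length),
          List.getD_eq_getElem a 0 (by omega : k + 1 < a.length)]
      simp [Nat.add_comm]
    have htake : (a.zip (a.drop 1)).take (k+1)
        = (a.zip (a.drop 1)).take k ++ [(a.getD k 0, a.getD (k+1) 0)] := by
      rw [List.take_add_one, List.getElem?_eq_getElem hzlen, hzk]
      rfl
    rw [htake, List.foldl_append, ih hk']
    simp only [List.foldl_cons, List.foldl_nil]
    simp only [pvB_step]
    rcases lt_trichotomy (a.getD k 0) (a.getD (k+1) 0) with hcmp | hcmp | hcmp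
    · -- rise
      rw [if_pos hcmp]
      have hL : pvL a (k+1) = pvL a k + 1 := by simp only [pvL]; rw [if_pos hcmp]
      have hF : pvF a (k+1) = 0 := by simp only [pvF]; rw [if_neg (by omega)]
      rw [pvS_succ_rise a k hcmp, hF]
      simp only [Nat.sub_zero]
      rw [hL]
      refine congrArg₂ Prod.mk ?_ (congrArg₂ Prod.mk ?_ (congrArg₂ Prod.mk ?_ ?_)) <;>
        push_cast <;> ring
    · -- equal
      rw [if_neg (by omega), if_pos hcmp.symm]
      have hL : pvL a (k+1) = 1 := by simp only [pvL]; rw [if_neg (by omega)]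
      have hF : pvF a (k+1) = 0 := by simp only [pvF]; rw [if_neg (by omega)]
      rw [pvS_succ_eq a k hcmp.symm, hF]
      simp only [Nat.sub_zero]
      rw [hL]
      refine congrArg₂ Prod.mk ?_ (congrArg₂ Prod.mk ?_ (congrArg₂ Prod.mk ?_ ?_)) <;>
        push_cast <;> ring
    · -- fall
      rw [if_neg (by omega), if_neg (by omega)]
      have hF : pvF a (k+1) = pvF a k + 1 := by simp only [pvF]; rw [if_pos hcmp]
      have hL : pvL a (k+1) = 1 := pvL_eq_one_of_fall a k hcmp
      rw [pvS_succ_fall a k hcmp, hF,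
          show k + 1 - (pvF a k + 1) = k - pvF a k from by omega, hL]
      refine congrArg₂ Prod.mk ?_ (congrArg₂ Prod.mk ?_ (congrArg₂ Prod.mk ?_ ?_))
      · split_ifs <;> ring
      · norm_num
      · push_cast; ring
      · rfl

lemma pvB_eq (a : List Int) (ha : a ≠ []) :
    templeOfferings_alt a = pvS a (a.length - 1) := by
  obtain ⟨x, t, rfl⟩ : ∃ x t, a = x :: t := by
    cases a with
    | nil => exact absurd rfl ha
    | cons x t => exact ⟨x, t, rfl⟩
  have hlen : ((x::t).zip ((x::t).drop 1)).length = (x::t).length - 1 := by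
    rw [List.length_zip, List.length_drop]
    simp
  have hinv := pvB_inv (x::t) ((x::t).length - 1) (by simp)
  show (((x::t).zip ((x::t).drop 1)).foldl pvB_step (1, 0, 0, 0)).1 = _
  rw [show ((x::t).zip ((x::t).drop 1))
        = ((x::t).zip ((x::t).drop 1)).take ((x::t).length - 1) from by
      rw [← hlen, List.take_length]]
  rw [hinv]

-- ---- A side ----
lemma pvGetD_set (l : List Int) (i j : Nat) (v : Int) :
    (l.set i v).getD j 0 = if i = j ∧ i < l.length then v else l.getD j 0 := by
  simp only [List.getD_eq_getElem?_getD, List.getElem?_set]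
  split_ifs <;> simp_all <;> omega

lemma pvA_loop1_length (a : List Int) (dp : List Int) (i : Nat) :
    (pvA_loop1 a dp i).length = dp.length := by
  by_cases h : i < a.length
  · rw [pvA_loop1, dif_pos h, pvA_loop1_length]
    simp
  · rw [pvA_loop1, dif_neg h]
termination_by a.length - i
decreasing_by omega

lemma pvA_loop2_length (a : List Int) (dp : List Int) (i : Nat) :
    (pvA_loop2 a dp i).length = dp.length := by
  induction i generalizing dp with
  | zero =>
    simp only [pvA_loop2]
    split <;> simp
  | succ m ih =>
    simp only [pvA_loop2]
    rw [ih]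
    split <;> simp

lemma pvA_loop1_spec (a : List Int) (i : Nat) (dp : List Int) (hlen : dp.length = a.length)
    (hi : 1 ≤ i) (hinv : ∀ j, j < i → dp.getD j 0 = pvL a j) :
    ∀ j, j < a.length → (pvA_loop1 a dp i).getD j 0 = pvL a j := by
  by_cases h : i < a.length
  · rw [pvA_loop1, dif_pos h]
    apply pvA_loop1_spec a (i+1)
    · simpa using hlen
    · omega
    · intro j hj
      rw [pvGetD_set]
      by_cases hji : i = j
      · subst hji
        rw [if_pos ⟨rfl, by omega⟩]
        obtain ⟨m, rfl⟩ : ∃ m, i = m + 1 := ⟨i - 1, by omega⟩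
        show (if a.getD (m+1) 0 > a.getD (m+1-1) 0 then 1 + dp.getD (m+1-1) 0 else 1) = pvL a (m+1)
        simp only [Nat.add_sub_cancel, pvL]
        rw [hinv m (by omega)]
        split
        · ring
        · rfl
      · rw [if_neg (by tauto)]
        exact hinv j (by omega)
  · rw [pvA_loop1, dif_neg h]
    intro j hj
    exact hinv j (by omega)
termination_by a.length - i
decreasing_by omega

-- the effect of one body of A's second loop at its own index
lemma pvLoop2_cell (a : List Int) (i : Nat) (dp : List Int) (hlen : dp.length = a.length)
    (hin : i + 2 ≤ a.length)
    (hdpi : dp.getD i 0 = pvL a i)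
    (hdpi1 : dp.getD (i+1) 0 = max (pvL a (i+1)) (pvR a (a.length - 1) (i+1))) :
    (if a.getD i 0 > a.getD (i+1) 0
     then dp.set i (max (dp.getD i 0) (dp.getD (i+1) 0 + 1)) else dp).getD i 0
      = max (pvL a i) (pvR a (a.length - 1) i) := by
  by_cases hf : a.getD i 0 > a.getD (i+1) 0
  · rw [if_pos hf, pvGetD_set, if_pos ⟨rfl, by omega⟩, hdpi, hdpi1]
    have hL1 : pvL a (i+1) = 1 := pvL_eq_one_of_fall a i hf
    have hR : pvR a (a.length - 1) i = pvR a (a.length - 1) (i+1) + 1 := by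
      conv_lhs => rw [pvR]
      rw [dif_pos ⟨by omega, hf⟩]
    have hRp := pvR_pos a (a.length - 1) (i+1)
    rw [hL1, hR]
    simp only [max_def]
    split_ifs <;> omega
  · rw [if_neg hf, hdpi, pvR_one a (a.length - 1) i hf]
    have := pvL_pos a i
    simp only [max_def]
    split_ifs <;> omega

lemma pvA_loop2_spec (a : List Int) (i : Nat) (dp : List Int) (hin : i + 2 ≤ a.length)
    (hlen : dp.length = a.length)
    (h1 : ∀ j, j ≤ i → dp.getD j 0 = pvL a j)
    (h2 : ∀ j, i < j → j < a.length → dp.getD j 0 = max (pvL a j) (pvR a (a.length - 1) j)) :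
    ∀ j, j < a.length →
      (pvA_loop2 a dp i).getD j 0 = max (pvL a j) (pvR a (a.length - 1) j) := by
  cases i with
  | zero =>
    intro j hj
    simp only [pvA_loop2]
    by_cases hj0 : j = 0
    · subst hj0
      exact pvLoop2_cell a 0 dp hlen hin (h1 0 le_rfl) (h2 1 (by omega) (by omega))
    · have : (if a.getD 0 0 > a.getD 1 0
          then dp.set 0 (max (dp.getD 0 0) (dp.getD 1 0 + 1)) else dp).getD j 0 = dp.getD j 0 := by
        split
        · rw [pvGetD_set, if_neg (by tauto)]
        · rfl
      rw [this]
      exact h2 j (by omega) hj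
  | succ m =>
    intro j hj
    simp only [pvA_loop2]
    apply pvA_loop2_spec a m
    · omega
    · split <;> simp [hlen]
    · intro j' hj'
      have : (if a.getD (m+1) 0 > a.getD (m+2) 0
          then dp.set (m+1) (max (dp.getD (m+1) 0) (dp.getD (m+2) 0 + 1)) else dp).getD j' 0
          = dp.getD j' 0 := by
        split
        · rw [pvGetD_set, if_neg (by omega)]
        · rfl
      rw [this]
      exact h1 j' (by omega)
    · intro j' hj'1 hj'2
      by_cases hjm : j' = m + 1
      · subst hjm
        exact pvLoop2_cell a (m+1) dp hlen hin (h1 (m+1) le_rfl) (h2 (m+2) (by omega) (by omega))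
      · have : (if a.getD (m+1) 0 > a.getD (m+2) 0
            then dp.set (m+1) (max (dp.getD (m+1) 0) (dp.getD (m+2) 0 + 1)) else dp).getD j' 0
            = dp.getD j' 0 := by
          split
          · rw [pvGetD_set, if_neg (by tauto)]
          · rfl
        rw [this]
        exact h2 j' (by omega) hj'2
    · exact hj

lemma pvSum_getD (l : List Int) : l.sum = ∑ i ∈ Finset.range l.length, l.getD i 0 := by
  induction l using List.reverseRecOn with
  | nil => simp
  | append_singleton xs x ih =>
    rw [List.sum_append, List.length_append, List.sum_cons, List.sum_nil]
    simp only [List.length_cons, List.length_nil, Nat.zero_add]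
    rw [Finset.sum_range_succ]
    have h1 : ∀ i ∈ Finset.range xs.length, (xs ++ [x]).getD i 0 = xs.getD i 0 := by
      intro i hi
      rw [List.getD_eq_getElem?_getD, List.getD_eq_getElem?_getD,
          List.getElem?_append_left (Finset.mem_range.mp hi)]
    rw [Finset.sum_congr rfl h1, ← ih]
    have h2 : (xs ++ [x]).getD xs.length 0 = x := by
      rw [List.getD_eq_getElem?_getD, List.getElem?_append_right le_rfl]
      simp
    rw [h2]
    ring

lemma pvA_eq (a : List Int) (ha : a ≠ []) :
    templeOfferings a = pvS a (a.length - 1) := by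
  have hn : 0 < a.length := List.length_pos_iff.mpr ha
  show (if 2 ≤ a.length
        then pvA_loop2 a (pvA_loop1 a ((List.replicate a.length (0:Int)).set 0 1) 1) (a.length - 2)
        else pvA_loop1 a ((List.replicate a.length (0:Int)).set 0 1) 1).sum = _
  have hlen0 : ((List.replicate a.length (0:Int)).set 0 1).length = a.length := by simp
  have hdp0 : ∀ j, j < 1 → ((List.replicate a.length (0:Int)).set 0 1).getD j 0 = pvL a j := by
    intro j hj
    have hj0 : j = 0 := by omega
    subst hj0
    rw [pvGetD_set, if_pos ⟨rfl, by simpa using hn⟩]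
    rfl
  have hdp1 := pvA_loop1_spec a 1 _ hlen0 le_rfl hdp0
  have hlen1 : (pvA_loop1 a ((List.replicate a.length (0:Int)).set 0 1) 1).length = a.length := by
    rw [pvA_loop1_length]; exact hlen0
  by_cases h2 : 2 ≤ a.length
  · rw [if_pos h2]
    have hdp2 := pvA_loop2_spec a (a.length - 2) _ (by omega) hlen1
      (fun j hj => hdp1 j (by omega))
      (fun j hj1 hj2 => by
        have hje : j = a.length - 1 := by omega
        subst hje
        rw [hdp1 _ (by omega), pvR_self, max_eq_left (pvL_pos a _)])
    have hlen2 : (pvA_loop2 a (pvA_loop1 a ((List.replicate a.length (0:Int)).set 0 1) 1)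
        (a.length - 2)).length = a.length := by
      rw [pvA_loop2_length]; exact hlen1
    rw [pvSum_getD, hlen2]
    unfold pvS
    rw [show a.length - 1 + 1 = a.length from by omega]
    exact Finset.sum_congr rfl (fun i hi => hdp2 i (Finset.mem_range.mp hi))
  · rw [if_neg h2]
    rw [pvSum_getD, hlen1]
    unfold pvS
    rw [show a.length - 1 + 1 = a.length from by omega]
    refine Finset.sum_congr rfl (fun i hi => ?_)
    have hi' : i = 0 := by have := Finset.mem_range.mp hi; omega
    subst hi'
    rw [hdp1 0 (by omega), show a.length - 1 = 0 from by omega, pvR_self,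
        max_eq_left (pvL_pos a 0)]

-- ===== VERDICT (by name: the statement is the Claim_ definition above) =====
theorem templeOfferings_spec : Claim_equal_templeOfferings := by
  intro a _ ha
  unfold Spec_templeOfferings
  rw [pvA_eq a ha, pvB_eq a ha]
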